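-- pv_equiv track=rewrite | github.com/albapepper/Scoracle | backend/app/db/local_dbs.py | _strip_specials_preserve_case
-- ===== SOURCE A (Python) =====
-- import unicodedata
-- from typing import List, Dict, Tuple, Optional
--
-- def _strip_specials_preserve_case(s: Optional[str]) -> str:
--     """Remove accents and non-alphanumeric characters while preserving case for display.
--
--     - Strips diacritics
--     - Removes any character not in [A-Za-z0-9 ]
--     - Collapses multiple spaces
--     """
--     if not s:
--         return ""
--     s_norm = unicodedata.normalize("NFKD", s)
--     s_ascii = "".join(ch for ch in s_norm if not unicodedata.combining(ch))
--     # Keep alnum and spaces only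
--     out = []
--     for ch in s_ascii:
--         if ch.isalnum() or ch == " ":
--             out.append(ch)
--         else:
--             # drop punctuation and symbols
--             continue
--     s_clean = "".join(out)
--     return " ".join(s_clean.split())
-- ===== SOURCE B (Python) =====
-- import unicodedata
-- from typing import Optional
--
--
-- def _strip_specials_preserve_case(s: Optional[str]) -> str:
--     """Split-on-space decomposition: clean each word, drop empties, rejoin."""
--     if not s:
--         return ""
--     s_norm = unicodedata.normalize("NFKD", s)
--     s_ascii = "".join(ch for ch in s_norm if not unicodedata.combining(ch))
--     words = []
--     for token in s_ascii.split(" "):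
--         cleaned = "".join(ch for ch in token if ch.isalnum())
--         if cleaned:
--             words.append(cleaned)
--     return " ".join(words)
-- ===== Notes on version B (the rewrite author's own statement) =====
-- stated objective: alternative
-- what changed: A filters characters (alnum-or-space) in one pass and then collapses whitespace runs via split()/join; B splits the input on the space character first, cleans each token down to its alphanumeric characters, drops tokens that become empty, and rejoins with single spaces.
import Mathlib
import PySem

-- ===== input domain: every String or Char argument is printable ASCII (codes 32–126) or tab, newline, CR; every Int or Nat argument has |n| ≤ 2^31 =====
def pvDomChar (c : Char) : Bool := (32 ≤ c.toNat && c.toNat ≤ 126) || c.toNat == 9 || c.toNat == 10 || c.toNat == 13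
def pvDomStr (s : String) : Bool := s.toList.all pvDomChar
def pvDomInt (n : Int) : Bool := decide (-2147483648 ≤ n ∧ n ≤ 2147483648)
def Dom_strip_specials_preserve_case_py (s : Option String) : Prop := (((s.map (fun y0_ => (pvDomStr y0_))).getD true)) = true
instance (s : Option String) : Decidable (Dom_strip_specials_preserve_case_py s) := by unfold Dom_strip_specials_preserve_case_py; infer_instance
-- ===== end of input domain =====

-- B replaces A's char-filter-then-collapse-spaces by split-on-' ', clean-each-word, rejoin (objective: alternative decomposition).

-- ===== PORT A =====
-- NFKD normalization followed by removal of combining characters is the identity on the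
-- ASCII domain stated by Dom_ (no ASCII character is combining, NFKD fixes ASCII); it is
-- ported as the identity, exact on that domain.
def strip_specials_preserve_case_py (s : Option String) : String :=
  match s with
  | none => ""                                   -- 'if not s: return ""' (None case)
  | some t =>
    if t.toList = [] then ""                     -- 'if not s: return ""' (empty-string case)
    else
      let s_ascii := t.toList                    -- NFKD + drop combining: identity on Dom
      -- for ch in s_ascii: append ch iff ch.isalnum() or ch == " "
      let out := s_ascii.foldl
        (fun acc ch => if PySem.Chars.isalnum ch || ch == ' ' then acc ++ [ch] else acc) []
      String.ofList (PySem.Chars.join [' '] (PySem.Chars.split₀ out))   -- " ".join(s_clean.split())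

-- ===== PORT B =====
def strip_specials_preserve_case_py_alt (s : Option String) : String :=
  match s with
  | none => ""
  | some t =>
    if t.toList = [] then ""
    else
      let s_ascii := t.toList                    -- NFKD + drop combining: identity on Dom
      let tokens := PySem.Chars.splitOn s_ascii [' ']          -- s_ascii.split(" ")
      -- words: cleaned tokens that are non-empty, in order
      let words := (tokens.map (fun w => w.filter PySem.Chars.isalnum)).filter
        (fun w => !w.isEmpty)
      String.ofList (PySem.Chars.join [' '] words)                 -- " ".join(words)

-- ===== PRECONDITION & SPEC =====
def Spec_strip_specials_preserve_case_py (s : Option String) (out : String) : Prop := out = strip_specials_preserve_case_py_alt s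
instance (s : Option String) (out : String) : Decidable (Spec_strip_specials_preserve_case_py s out) := by unfold Spec_strip_specials_preserve_case_py; infer_instance

-- ===== CLAIM (what is proved, stated in full; the proofs are below) =====
def Claim_equal_strip_specials_preserve_case_py : Prop := ∀ (s : Option String), Dom_strip_specials_preserve_case_py s → Spec_strip_specials_preserve_case_py s (strip_specials_preserve_case_py s)

-- ===== LEMMAS AND PROOFS =====

-- Proof-only bridge: split a char list at the literal ' ' (first word, remaining words).
def pvWSplit : List Char → List Char × List (List Char)
  | [] => ([], [])
  | c :: rest =>
    let p := pvWSplit rest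
    if c = ' ' then ([], p.1 :: p.2) else (c :: p.1, p.2)

theorem pvAlnumNotSpace (c : Char) (h : PySem.Chars.isalnum c = true) :
    PySem.Chars.isspace c = false := by
  simp only [PySem.Chars.isalnum, PySem.Chars.isalpha, PySem.Chars.isdigit, PySem.Chars.isupper,
    PySem.Chars.islower, PySem.Chars.isspace, Char.le_def, Bool.or_eq_true, Bool.and_eq_true,
    decide_eq_true_eq, Bool.or_eq_false_iff, Bool.and_eq_false_iff, decide_eq_false_iff_not] at h ⊢
  have h4 : (65 ≤ c.toNat ∧ c.toNat ≤ 90) ∨ (97 ≤ c.toNat ∧ c.toNat ≤ 122) ∨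
      (48 ≤ c.toNat ∧ c.toNat ≤ 57) := by
    rcases h with (⟨a, b⟩ | ⟨a, b⟩) | ⟨a, b⟩
    · exact Or.inl ⟨UInt32.le_iff_toNat_le.mp a, UInt32.le_iff_toNat_le.mp b⟩
    · exact Or.inr (Or.inl ⟨UInt32.le_iff_toNat_le.mp a, UInt32.le_iff_toNat_le.mp b⟩)
    · exact Or.inr (Or.inr ⟨UInt32.le_iff_toNat_le.mp a, UInt32.le_iff_toNat_le.mp b⟩)
  omega

-- splitOn on the one-character separator [' '] is pvWSplit.
theorem pvSplitOnGo (l : List Char) : ∀ (fuel : Nat) (cur : List Char) (acc : List (List Char)),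
    l.length < fuel →
    PySem.Chars.splitOn.go [' '] fuel l cur acc =
      acc.reverse ++ (cur.reverse ++ (pvWSplit l).1) :: (pvWSplit l).2 := by
  induction l with
  | nil =>
    intro fuel cur acc hf
    match fuel, hf with
    | fuel + 1, _ => simp [PySem.Chars.splitOn.go, pvWSplit]
  | cons c rest ih =>
    intro fuel cur acc hf
    match fuel, hf with
    | fuel + 1, hf =>
      by_cases hc : c = ' '
      · subst hc
        rw [show PySem.Chars.splitOn.go [' '] (fuel + 1) (' ' :: rest) cur acc =
            PySem.Chars.splitOn.go [' '] fuel rest [] (cur.reverse :: acc) by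
          simp [PySem.Chars.splitOn.go, List.isPrefixOf]]
        rw [ih fuel [] (cur.reverse :: acc) (by simpa using hf)]
        simp [pvWSplit]
      · rw [show PySem.Chars.splitOn.go [' '] (fuel + 1) (c :: rest) cur acc =
            PySem.Chars.splitOn.go [' '] fuel rest (c :: cur) acc by
          simp [PySem.Chars.splitOn.go, List.isPrefixOf, Ne.symm hc]]
        rw [ih fuel (c :: cur) acc (by simpa using hf)]
        simp [pvWSplit, hc]

theorem pvSplitOnEq (l : List Char) :
    PySem.Chars.splitOn l [' '] = (pvWSplit l).1 :: (pvWSplit l).2 := by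
  have := pvSplitOnGo l (l.length + 1) [] [] (by omega)
  simpa [PySem.Chars.splitOn] using this

-- On strings whose only whitespace character is ' ', split₀ is pvWSplit minus empty words.
theorem pvSplitZeroGo (l : List Char) : ∀ (cur : List Char) (acc : List (List Char)),
    (∀ c ∈ l, PySem.Chars.isspace c = (c == ' ')) →
    PySem.Chars.split₀.go l cur acc =
      acc.reverse ++ (((cur.reverse ++ (pvWSplit l).1) :: (pvWSplit l).2).filter
        (fun w => !w.isEmpty)) := by
  induction l with
  | nil =>
    intro cur acc _
    by_cases hc : cur = []
    · subst hc; simp [PySem.Chars.split₀.go, pvWSplit]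
    · simp [PySem.Chars.split₀.go, pvWSplit, List.isEmpty_iff, hc]
  | cons c rest ih =>
    intro cur acc h
    have hc := h c (by simp)
    have hrest : ∀ c ∈ rest, PySem.Chars.isspace c = (c == ' ') := fun d hd => h d (by simp [hd])
    by_cases hsp : c = ' '
    · subst hsp
      by_cases hcur : cur = []
      · subst hcur
        rw [show PySem.Chars.split₀.go (' ' :: rest) [] acc =
            PySem.Chars.split₀.go rest [] acc by simp [PySem.Chars.split₀.go, hc]]
        rw [ih [] acc hrest]
        simp [pvWSplit]
      · rw [show PySem.Chars.split₀.go (' ' :: rest) cur acc =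
            PySem.Chars.split₀.go rest [] (cur.reverse :: acc) by
          simp [PySem.Chars.split₀.go, hc, List.isEmpty_iff, hcur]]
        rw [ih [] (cur.reverse :: acc) hrest]
        simp [pvWSplit, hcur]
    · have hns : PySem.Chars.isspace c = false := by
        rw [hc]; simp [hsp]
      rw [show PySem.Chars.split₀.go (c :: rest) cur acc =
          PySem.Chars.split₀.go rest (c :: cur) acc by simp [PySem.Chars.split₀.go, hns]]
      rw [ih (c :: cur) acc hrest]
      simp [pvWSplit, hsp]

theorem pvSplitZeroEq (l : List Char) (h : ∀ c ∈ l, PySem.Chars.isspace c = (c == ' ')) :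
    PySem.Chars.split₀ l =
      (((pvWSplit l).1 :: (pvWSplit l).2).filter (fun w => !w.isEmpty)) := by
  have := pvSplitZeroGo l [] [] h
  simpa [PySem.Chars.split₀] using this

-- Filtering with 'alnum-or-space' commutes with splitting at ' ': each word gets filtered by alnum.
theorem pvWSplitFilter (l : List Char) :
    pvWSplit (l.filter (fun c => PySem.Chars.isalnum c || c == ' ')) =
      ((pvWSplit l).1.filter PySem.Chars.isalnum,
        (pvWSplit l).2.map (fun w => w.filter PySem.Chars.isalnum)) := by
  induction l with
  | nil => simp [pvWSplit]
  | cons c rest ih =>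
    by_cases hsp : c = ' '
    · subst hsp
      simp [pvWSplit, ih, show PySem.Chars.isalnum ' ' = false from rfl]
    · by_cases ha : PySem.Chars.isalnum c = true
      · simp [pvWSplit, ha, hsp, ih]
      · simp only [Bool.not_eq_true] at ha
        simp [pvWSplit, ha, hsp, ih]

-- A's append-loop is a filter.
theorem pvFoldlFilter (l : List Char) :
    l.foldl (fun acc ch => if PySem.Chars.isalnum ch || ch == ' ' then acc ++ [ch] else acc) [] =
      l.filter (fun c => PySem.Chars.isalnum c || c == ' ') :=
  by simpa using PySem.List.foldl_append_if (p := fun c : Char => PySem.Chars.isalnum c || c == ' ') (f := fun c : Char => c) l []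

-- every character of the filtered list has ' ' as its only possible whitespace form
theorem pvFilteredSpace (l : List Char) :
    ∀ c ∈ l.filter (fun c => PySem.Chars.isalnum c || c == ' '),
      PySem.Chars.isspace c = (c == ' ') := by
  intro c hcm
  have hp := List.of_mem_filter hcm
  simp only [Bool.or_eq_true, beq_iff_eq] at hp
  rcases hp with ha | hs
  · rw [pvAlnumNotSpace c ha]
    have : c ≠ ' ' := by
      intro he; subst he; exact absurd ha (by decide)
    simp [this]
  · subst hs; decide

-- ===== VERDICT (by name: the statement is the Claim_ definition above) =====
theorem strip_specials_preserve_case_py_spec : Claim_equal_strip_specials_preserve_case_py := by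
  intro s _
  unfold Spec_strip_specials_preserve_case_py
  match s with
  | none => rfl
  | some t =>
    by_cases ht : t.toList = []
    · simp [strip_specials_preserve_case_py, strip_specials_preserve_case_py_alt, ht]
    · simp only [strip_specials_preserve_case_py, strip_specials_preserve_case_py_alt, ht]
      rw [pvFoldlFilter, pvSplitZeroEq _ (pvFilteredSpace t.toList), pvWSplitFilter,
        pvSplitOnEq]
      simp
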